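-- pv_equiv track=rewrite | github.com/jidodata-ykim/RD-Agent | rdagent/scenarios/ragops/developer.py | _generate_env_content
-- ===== SOURCE A (Python) =====
-- from typing import Dict, Any
--
-- def _generate_env_content(config: Dict[str, str]) -> str:
--     """Generate the content of the .env file from the configuration dict."""
--     lines = []
--
--     # Group related configurations
--     groups = {
--         "LLM Configuration": ["LLM_", "TEMPERATURE", "MAX_TOKENS", "MAX_ASYNC"],
--         "Embedding Configuration": ["EMBEDDING_"],
--         "Storage Configuration": ["LIGHTRAG_"],
--         "RAG Query Settings": ["RETRIEVAL_MODE", "TOP_K", "COSINE_THRESHOLD", "CHUNK_"],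
--     }
--
--     for group_name, prefixes in groups.items():
--         lines.append(f"# {group_name}")
--         for key, value in sorted(config.items()):
--             if any(key.startswith(prefix) for prefix in prefixes) or key in prefixes:
--                 lines.append(f"{key}={value}")
--         lines.append("")  # Empty line between groups
--
--     # Add any remaining keys not in groups
--     remaining_keys = []
--     for key in config:
--         if not any(
--             any(key.startswith(prefix) for prefix in prefixes) or key in prefixes
--             for prefixes in groups.values()
--         ):
--             remaining_keys.append(key)
--
--     if remaining_keys:
--         lines.append("# Other Configuration")
--         for key in sorted(remaining_keys):
--             lines.append(f"{key}={config[key]}")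
--         lines.append("")
--
--     return "\n".join(lines).strip() + "\n"
-- ===== SOURCE B (Python) =====
-- def _matches(key, prefixes):
--     return any(key.startswith(p) for p in prefixes) or key in prefixes
--
--
-- def _generate_env_content(config):
--     """Generate the content of the .env file from the configuration dict."""
--     groups = [
--         ("LLM Configuration", ["LLM_", "TEMPERATURE", "MAX_TOKENS", "MAX_ASYNC"]),
--         ("Embedding Configuration", ["EMBEDDING_"]),
--         ("Storage Configuration", ["LIGHTRAG_"]),
--         ("RAG Query Settings", ["RETRIEVAL_MODE", "TOP_K", "COSINE_THRESHOLD", "CHUNK_"]),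
--     ]
--
--     # One pass over the sorted items: multi-assign each rendered line to every
--     # matching group's bucket, and to `rest` when no group matches.
--     buckets = [[] for _ in groups]
--     rest = []
--     for key, value in sorted(config.items()):
--         line = f"{key}={value}"
--         buckets = [
--             bucket + [line] if _matches(key, prefixes) else bucket
--             for (_, prefixes), bucket in zip(groups, buckets)
--         ]
--         if not any(_matches(key, prefixes) for _, prefixes in groups):
--             rest.append(line)
--
--     lines = []
--     for (name, _), bucket in zip(groups, buckets):
--         lines.append(f"# {name}")
--         lines.extend(bucket)
--         lines.append("")
--     if rest:
--         lines.append("# Other Configuration")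
--         lines.extend(rest)
--         lines.append("")
--     return "\n".join(lines).strip() + "\n"
-- ===== Notes on version B (the rewrite author's own statement) =====
-- stated objective: alternative
-- what changed: A filters the sorted items once per group (four scans) and makes a separate pass over the dict for leftover keys that it then re-sorts and re-looks up; B makes one classifying pass over the sorted items that multi-assigns each rendered line to every matching group's bucket and to a rest list, then just emits the buckets.
import Mathlib
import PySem

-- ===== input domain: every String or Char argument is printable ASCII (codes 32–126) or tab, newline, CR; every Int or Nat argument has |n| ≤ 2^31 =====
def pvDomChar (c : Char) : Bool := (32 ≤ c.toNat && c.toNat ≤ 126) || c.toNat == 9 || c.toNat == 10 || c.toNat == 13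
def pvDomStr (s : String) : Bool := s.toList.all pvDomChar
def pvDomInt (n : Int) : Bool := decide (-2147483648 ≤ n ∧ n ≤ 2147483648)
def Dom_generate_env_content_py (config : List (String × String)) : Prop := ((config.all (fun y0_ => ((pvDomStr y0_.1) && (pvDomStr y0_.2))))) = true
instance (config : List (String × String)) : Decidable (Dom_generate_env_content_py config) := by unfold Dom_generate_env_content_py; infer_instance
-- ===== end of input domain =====

-- B replaces A's four filtering passes over the sorted items (plus a separate pass for leftovers)
-- by a single classifying pass that multi-assigns each rendered line to every matching group's
-- bucket; objective: alternative decomposition (same asymptotic cost, one traversal of the items).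


-- the `groups` literal of both Pythons, and the shared membership test
-- `any(key.startswith(prefix) for prefix in prefixes) or key in prefixes`
def pvGroups : List (String × List String) :=
  [("LLM Configuration", ["LLM_", "TEMPERATURE", "MAX_TOKENS", "MAX_ASYNC"]),
   ("Embedding Configuration", ["EMBEDDING_"]),
   ("Storage Configuration", ["LIGHTRAG_"]),
   ("RAG Query Settings", ["RETRIEVAL_MODE", "TOP_K", "COSINE_THRESHOLD", "CHUNK_"])]

def pvMatches (key : String) (prefixes : List String) : Bool :=
  prefixes.any (fun p => PySem.Str.startswith key p) || prefixes.contains key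

-- ===== PORT A =====
-- `sorted(config.items())` sorts pairs by Python's tuple order = PySem.List.sorted2.
-- `config[key]` is a dict lookup (first match in the association list); in A it is only
-- reached for keys of config, so the KeyError branch is unreachable and `.getD ""` is exact.
def generate_env_content_py (config : List (String × String)) : String :=
  let lines : List String :=
    pvGroups.foldl (fun lines gp =>
      ((PySem.List.sorted2 config Prod.fst Prod.snd).foldl
        (fun lines kv =>
          if pvMatches kv.1 gp.2 then lines ++ [kv.1 ++ "=" ++ kv.2] else lines)
        (lines ++ ["# " ++ gp.1])) ++ [""]) []
  let remaining_keys : List String :=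
    config.foldl (fun acc kv =>
      if !(pvGroups.any (fun gp => pvMatches kv.1 gp.2)) then acc ++ [kv.1] else acc) []
  let lines : List String :=
    if remaining_keys ≠ [] then
      ((PySem.List.sorted remaining_keys (fun k => k)).foldl
        (fun acc k => acc ++ [k ++ "=" ++ ((config.lookup k).getD "")])
        (lines ++ ["# Other Configuration"])) ++ [""]
    else lines
  PySem.Str.strip (PySem.Str.join "\n" lines) ++ "\n"

-- ===== PORT B =====
def generate_env_content_py_alt (config : List (String × String)) : String :=
  let st : List (List String) × List String :=
    (PySem.List.sorted2 config Prod.fst Prod.snd).foldl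
      (fun st kv =>
        let line := kv.1 ++ "=" ++ kv.2
        ((pvGroups.zip st.1).map
           (fun gb => if pvMatches kv.1 gb.1.2 then gb.2 ++ [line] else gb.2),
         if !(pvGroups.any (fun gp => pvMatches kv.1 gp.2)) then st.2 ++ [line] else st.2))
      (pvGroups.map (fun _ => []), [])
  let lines : List String :=
    (pvGroups.zip st.1).foldl
      (fun lines gb => ((lines ++ ["# " ++ gb.1.1]) ++ gb.2) ++ [""]) []
  let lines : List String :=
    if st.2 ≠ [] then ((lines ++ ["# Other Configuration"]) ++ st.2) ++ [""] else lines
  PySem.Str.strip (PySem.Str.join "\n" lines) ++ "\n"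

-- ===== PRECONDITION & SPEC =====
-- Pre_ excludes association lists with duplicate keys: A's parameter is a Python dict, which
-- cannot contain duplicate keys, so the ports' behaviour on such lists is an artefact of the
-- association-list encoding, not a behaviour of A.
def Pre_generate_env_content_py (config : List (String × String)) : Prop :=
  (config.map Prod.fst).Nodup

instance (config : List (String × String)) : Decidable (Pre_generate_env_content_py config) := by
  unfold Pre_generate_env_content_py; infer_instance

def pvWitness_generate_env_content_py : (List (String × String)) :=
  [("LLM_MODEL", "gpt-4"), ("TOP_K", "5"), ("FOO", "bar")]

def Spec_generate_env_content_py (config : List (String × String)) (out : String) : Prop := out = generate_env_content_py_alt config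
instance (config : List (String × String)) (out : String) : Decidable (Spec_generate_env_content_py config out) := by unfold Spec_generate_env_content_py; infer_instance

-- ===== CLAIM (what is proved, stated in full; the proofs are below) =====
def Claim_equal_generate_env_content_py : Prop := ∀ (config : List (String × String)), Dom_generate_env_content_py config → Pre_generate_env_content_py config → Spec_generate_env_content_py config (generate_env_content_py config)

-- ===== LEMMAS AND PROOFS =====

-- Python's tuple comparison for sorted2 (key, then value) and the plain key comparison.
def pvLt2 : (String × String) → (String × String) → Bool :=
  fun a b => decide (a.1 < b.1) || (!decide (b.1 < a.1) && decide (a.2 < b.2))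
def pvLt1 : (String × String) → (String × String) → Bool :=
  fun a b => decide (a.1 < b.1)

theorem pv_insertBy_perm {α : Type} (f : α → α → Bool) (x : α) (ys : List α) :
    (PySem.List.insertBy f x ys).Perm (x :: ys) := by
  induction ys with
  | nil => simp [PySem.List.insertBy]
  | cons y ys ih =>
    simp only [PySem.List.insertBy]
    split
    · exact List.Perm.refl _
    · exact ((ih.cons y).trans (List.Perm.swap x y ys))

theorem pv_insertBy_congr {α : Type} (f g : α → α → Bool) (x : α) (ys : List α)
    (h : ∀ y ∈ ys, f x y = g x y) :
    PySem.List.insertBy f x ys = PySem.List.insertBy g x ys := by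
  induction ys with
  | nil => rfl
  | cons y ys ih =>
    simp only [PySem.List.insertBy]
    rw [h y (by simp)]
    split
    · rfl
    · rw [ih (fun z hz => h z (by simp [hz]))]

theorem pv_foldl_insertBy_congr (xs : List (String × String)) :
    ∀ (acc : List (String × String)), ((acc ++ xs).map Prod.fst).Nodup →
    xs.foldl (fun a x => PySem.List.insertBy pvLt2 x a) acc
      = xs.foldl (fun a x => PySem.List.insertBy pvLt1 x a) acc := by
  induction xs with
  | nil => intro acc _; rfl
  | cons x xs ih =>
    intro acc h
    have hx : ∀ y ∈ acc, pvLt2 x y = pvLt1 x y := by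
      intro y hy
      have hne : x.1 ≠ y.1 := by
        have hnd : (acc.map Prod.fst ++ x.1 :: xs.map Prod.fst).Nodup := by
          simpa using h
        have hdisj := (List.nodup_append.mp hnd).2.2
        intro he
        exact hdisj y.1 ((List.mem_map_of_mem hy : y.1 ∈ acc.map Prod.fst)) x.1 (by simp) he.symm
      rcases lt_trichotomy x.1 y.1 with hlt | heq | hgt
      · simp [pvLt1, pvLt2, hlt]
      · exact absurd heq hne
      · simp [pvLt1, pvLt2, hgt, not_lt_of_gt hgt]
    have step : PySem.List.insertBy pvLt2 x acc = PySem.List.insertBy pvLt1 x acc :=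
      pv_insertBy_congr _ _ _ _ hx
    simp only [List.foldl_cons, step]
    apply ih
    have hperm : ((PySem.List.insertBy pvLt1 x acc ++ xs).map Prod.fst).Perm
        (((acc ++ x :: xs)).map Prod.fst) := by
      apply List.Perm.map
      exact ((pv_insertBy_perm pvLt1 x acc).append_right xs).trans List.perm_middle.symm
    exact (hperm.symm.nodup) h

-- under distinct keys, Python's pair sort is the key sort
theorem pv_sorted2_eq (config : List (String × String))
    (h : (config.map Prod.fst).Nodup) :
    PySem.List.sorted2 config Prod.fst Prod.snd = PySem.List.sorted config Prod.fst := by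
  show config.foldl (fun a x => PySem.List.insertBy pvLt2 x a) []
      = config.foldl (fun a x => PySem.List.insertBy pvLt1 x a) []
  exact pv_foldl_insertBy_congr config [] (by simpa using h)

-- abbreviations used only by the proofs
def pvQ (kv : String × String) : Bool := !(pvGroups.any (fun gp => pvMatches kv.1 gp.2))
def pvRender (kv : String × String) : String := kv.1 ++ "=" ++ kv.2

theorem pv_alt_fold (s : List (String × String)) :
    ∀ (f : String × List String → List String) (r : List String),
    s.foldl
      (fun st kv =>
        let line := kv.1 ++ "=" ++ kv.2
        ((pvGroups.zip st.1).map
           (fun gb => if pvMatches kv.1 gb.1.2 then gb.2 ++ [line] else gb.2),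
         if !(pvGroups.any (fun gp => pvMatches kv.1 gp.2)) then st.2 ++ [line] else st.2))
      (pvGroups.map f, r)
    = (pvGroups.map (fun gp => f gp ++ (s.filter (fun kv => pvMatches kv.1 gp.2)).map pvRender),
       r ++ (s.filter pvQ).map pvRender) := by
  induction s with
  | nil => intro f r; simp
  | cons kv s ih =>
    intro f r
    rw [List.foldl_cons]
    have hzip := @List.zip_map' _ _ _ id f pvGroups
    simp only [List.map_id] at hzip
    dsimp only
    rw [hzip, List.map_map]
    simp only [id_eq]
    have h1 : pvGroups.map ((fun gb : (String × List String) × List String =>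
          if pvMatches kv.1 gb.1.2 = true then gb.2 ++ [kv.1 ++ "=" ++ kv.2] else gb.2) ∘
          (fun gp => (gp, f gp)))
        = pvGroups.map (fun gp => f gp ++ (if pvMatches kv.1 gp.2 then [kv.1 ++ "=" ++ kv.2] else [])) := by
      apply List.map_congr_left
      intro gp _
      by_cases hc : pvMatches kv.1 gp.2 <;> simp [hc, Function.comp]
    rw [h1, ih]
    simp only [Prod.mk.injEq]
    refine ⟨?_, ?_⟩
    · apply List.map_congr_left
      intro gp _
      by_cases hc : pvMatches kv.1 gp.2 <;>
        simp [hc, pvRender, List.append_assoc]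
    · by_cases hq : (pvGroups.any fun gp => pvMatches kv.1 gp.2) <;>
        simp [hq, pvQ, pvRender, List.append_assoc]

theorem pv_lookup_eq (config : List (String × String)) (kv : String × String)
    (h : (config.map Prod.fst).Nodup) (hm : kv ∈ config) :
    config.lookup kv.1 = some kv.2 := by
  induction config with
  | nil => cases hm
  | cons c cs ih =>
    rcases List.mem_cons.mp hm with rfl | hm
    · simp [List.lookup]
    · have h2 := h
      simp only [List.map_cons, List.nodup_cons] at h2
      have hne : kv.1 ≠ c.1 := by
        intro he
        exact h2.1 (he ▸ List.mem_map_of_mem hm)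
      have hb : (kv.1 == c.1) = false := beq_eq_false_iff_ne.mpr hne
      simp only [List.lookup, hb]
      exact ih h2.2 hm

theorem pv_zip_map (F : String × List String → List String) :
    pvGroups.zip (pvGroups.map F) = pvGroups.map (fun gp => (gp, F gp)) := by
  have h := @List.zip_map' _ _ _ id F pvGroups
  simpa using h

theorem pv_rest_eq (config : List (String × String))
    (h : (config.map Prod.fst).Nodup) :
    (PySem.List.sorted ((config.filter pvQ).map (fun kv => kv.1)) (fun k => k)).map
        (fun k => k ++ "=" ++ ((config.lookup k).getD ""))
      = ((PySem.List.sorted config Prod.fst).filter pvQ).map pvRender := by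
  have hperm : ((PySem.List.sorted config Prod.fst).filter pvQ).Perm (config.filter pvQ) :=
    (PySem.List.sorted_perm config Prod.fst false).filter pvQ
  have hkey : PySem.List.sorted ((config.filter pvQ).map (fun kv => kv.1)) (fun k => k)
      = ((PySem.List.sorted config Prod.fst).filter pvQ).map (fun kv => kv.1) := by
    apply PySem.List.sorted_eq_of_perm_of_pairwise_lt
    · exact hperm.map _
    · rw [List.pairwise_map]
      have h1 : (PySem.List.sorted config Prod.fst).Pairwise (fun a b => a.1 ≤ b.1) :=
        PySem.List.sorted_pairwise config Prod.fst
      have h2 : (PySem.List.sorted config Prod.fst).Pairwise (fun a b => a.1 ≠ b.1) := by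
        have hnd : ((PySem.List.sorted config Prod.fst).map Prod.fst).Nodup :=
          (((PySem.List.sorted_perm config Prod.fst false).map Prod.fst).symm).nodup h
        exact List.pairwise_map.mp hnd
      exact ((h1.and h2).imp (fun hab => lt_of_le_of_ne hab.1 hab.2)).filter pvQ
  rw [hkey, List.map_map]
  apply List.map_congr_left
  intro kv hkv
  have hm : kv ∈ config := by
    have hmem := List.mem_of_mem_filter hkv
    exact (PySem.List.mem_sorted config Prod.fst false kv).mp hmem
  have hl := pv_lookup_eq config kv h hm
  simp [Function.comp, hl, pvRender]

-- ===== VERDICT (by name: the statement is the Claim_ definition above) =====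
theorem generate_env_content_py_spec : Claim_equal_generate_env_content_py := by
  intro config _ hpre
  show generate_env_content_py config = generate_env_content_py_alt config
  unfold generate_env_content_py generate_env_content_py_alt
  rw [pv_sorted2_eq config hpre]
  rw [pv_alt_fold (PySem.List.sorted config Prod.fst) (fun _ => []) []]
  simp only [PySem.List.foldl_append_if, PySem.List.foldl_append_singleton_eq_map, pv_zip_map, List.nil_append]
  have hQ : (fun x : String × String => !pvGroups.any fun gp => pvMatches x.1 gp.2) = pvQ := rfl
  rw [hQ]
  have hlen : ((PySem.List.sorted config Prod.fst).filter pvQ).length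
      = (config.filter pvQ).length :=
    ((PySem.List.sorted_perm config Prod.fst false).filter pvQ).length_eq
  have hiff : (List.map pvRender ((PySem.List.sorted config Prod.fst).filter pvQ) ≠ [])
      ↔ (List.map Prod.fst (config.filter pvQ) ≠ []) := by
    simp only [ne_eq, ← List.length_eq_zero_iff, List.length_map, hlen]
  simp only [hiff]
  split_ifs with hrem
  · rw [pv_rest_eq config hpre]
    rfl
  · rfl
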